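-- pv_equiv track=rewrite | github.com/comp525/h1solution | h1.py | average_odd_1_to_n
-- ===== SOURCE A (Python) =====
-- def is_even(number):
--     """
--     Checks if number is even
--     number: integer
--     Returns: True if number is even, False otherwise
--     """
--     if number % 2 == 0:
--         return True
--     return False
--
-- def average_odd_1_to_n(n):
--     """
--     Calculates the average of odd integers between 1 and given n
--     n: positive integer
--     Returns: integer
--     """
--     sum = 0
--     count = 0
--     for num in range(1, n + 1):
--         if not is_even(num):
--             sum = sum + num
--             count = count + 1
--     return sum // count
-- ===== SOURCE B (Python) =====
-- def average_odd_1_to_n(n):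
--     """
--     Calculates the average of odd integers between 1 and given n
--     n: positive integer
--     Returns: integer
--     """
--     # there are (n+1)//2 odd numbers in 1..n and their sum is ((n+1)//2)**2,
--     # so the (floor) average is exactly (n+1)//2
--     return (n + 1) // 2
-- ===== Notes on version B (the rewrite author's own statement) =====
-- stated objective: faster
-- what changed: Replaces the O(n) loop that sums and counts the odd numbers with the closed form (n+1)//2 (there are m=(n+1)//2 odds in 1..n summing to m^2, so the average is m).
import Mathlib
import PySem

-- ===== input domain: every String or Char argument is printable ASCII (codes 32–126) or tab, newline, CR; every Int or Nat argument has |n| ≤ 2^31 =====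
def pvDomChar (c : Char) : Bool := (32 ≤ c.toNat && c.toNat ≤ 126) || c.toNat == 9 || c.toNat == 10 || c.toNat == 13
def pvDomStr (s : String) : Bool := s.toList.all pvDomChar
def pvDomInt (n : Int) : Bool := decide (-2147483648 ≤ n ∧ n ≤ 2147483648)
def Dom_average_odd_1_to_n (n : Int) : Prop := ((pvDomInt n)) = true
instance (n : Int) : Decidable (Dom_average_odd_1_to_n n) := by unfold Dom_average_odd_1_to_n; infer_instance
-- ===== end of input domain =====

-- B replaces A's O(n) summing loop with the closed form (n+1)//2 (faster in a timing run: asymptotic O(n) -> O(1)).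


-- ===== PORT A =====
def is_even (number : Int) : Bool :=
  if PySem.Int.mod number 2 = 0 then true else false

-- the loop body of A: update (sum, count) with one num
def stepA (st : Int × Int) (num : Int) : Int × Int :=
  if ¬ is_even num then (st.1 + num, st.2 + 1) else st

def average_odd_1_to_n (n : Int) : Int :=
  let r := (PySem.List.pyRange 1 (n + 1) 1).foldl stepA (0, 0)
  PySem.Int.floordiv r.1 r.2

-- ===== PORT B =====
def average_odd_1_to_n_alt (n : Int) : Int :=
  PySem.Int.floordiv (n + 1) 2

-- ===== PRECONDITION & SPEC =====
-- A raises ZeroDivisionError for n ≤ 0 (the loop never runs, count stays 0)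
def Pre_average_odd_1_to_n (n : Int) : Prop := 1 ≤ n
instance (n : Int) : Decidable (Pre_average_odd_1_to_n n) := by unfold Pre_average_odd_1_to_n; infer_instance
def pvWitness_average_odd_1_to_n : Int := 7

def Spec_average_odd_1_to_n (n : Int) (out : Int) : Prop := out = average_odd_1_to_n_alt n
instance (n : Int) (out : Int) : Decidable (Spec_average_odd_1_to_n n out) := by unfold Spec_average_odd_1_to_n; infer_instance

-- ===== CLAIM (what is proved, stated in full; the proofs are below) =====
def Claim_equal_average_odd_1_to_n : Prop := ∀ (n : Int), Dom_average_odd_1_to_n n → Pre_average_odd_1_to_n n → Spec_average_odd_1_to_n n (average_odd_1_to_n n)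

-- ===== LEMMAS AND PROOFS =====

-- After processing 1..k, sum = m² and count = m where m = (k+1)/2 (the number of odds in 1..k).
lemma loopA_eval (k : Nat) :
    (PySem.List.pyRange 1 ((k : Int) + 1) 1).foldl stepA (0, 0) =
      ((((k + 1) / 2 : Nat) : Int) * (((k + 1) / 2 : Nat) : Int), (((k + 1) / 2 : Nat) : Int)) := by
  induction k with
  | zero =>
      simp [PySem.List.pyRange_one_eq_nil (by omega : (1 : Int) + 1 ≤ 1 ∨ True)]
  | succ k ih =>
      have hsplit : PySem.List.pyRange 1 ((k : Int) + 1 + 1) 1 =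
          PySem.List.pyRange 1 ((k : Int) + 1) 1 ++ [(k : Int) + 1] :=
        PySem.List.pyRange_one_succ_right (by omega)
      have hcast : ((k.succ : Nat) : Int) + 1 = (k : Int) + 1 + 1 := by push_cast; ring
      rw [hcast, hsplit, List.foldl_append, ih]
      have hmod : PySem.Int.mod ((k : Int) + 1) 2 = (((k + 1) % 2 : Nat) : Int) := by
        exact_mod_cast PySem.Int.mod_natCast (k + 1) 2
      rcases Nat.even_or_odd (k + 1) with he | ho
      · -- k+1 even: it is not added
        have h2 : (k + 1) % 2 = 0 := Nat.even_iff.mp he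
        have hm : (k + 2) / 2 = (k + 1) / 2 := by omega
        have hd : (2 : Int) ∣ (k : Int) + 1 := by omega
        simp [stepA, is_even, hm, hd]
      · -- k+1 odd: it is added
        have h2 : (k + 1) % 2 = 1 := Nat.odd_iff.mp ho
        have hm : (k + 2) / 2 = (k + 1) / 2 + 1 := by omega
        have hk1 : k + 1 = 2 * ((k + 1) / 2) + 1 := by omega
        have hfalse : is_even ((k : Int) + 1) = false := by
          unfold is_even
          rw [hmod, h2]
          norm_num
        simp only [List.foldl_cons, List.foldl_nil, stepA, hfalse, Bool.false_eq_true,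
          not_false_eq_true, ite_true, Prod.mk.injEq]
        constructor
        · push_cast [hm]
          nlinarith [hk1]
        · push_cast [hm]; ring

theorem average_odd_1_to_n_spec : Claim_equal_average_odd_1_to_n := by
  intro n _ hpre
  unfold Pre_average_odd_1_to_n at hpre
  show average_odd_1_to_n n = average_odd_1_to_n_alt n
  obtain ⟨k, hk1, hk⟩ : ∃ k : Nat, 1 ≤ k ∧ n = (k : Int) := ⟨n.toNat, by omega, by omega⟩
  subst hk
  have hm : 1 ≤ (k + 1) / 2 := by omega
  unfold average_odd_1_to_n average_odd_1_to_n_alt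
  rw [loopA_eval k]
  have h1 : ((((k + 1) / 2 : Nat) : Int)) * ((((k + 1) / 2 : Nat) : Int)) =
      ((((k + 1) / 2) * ((k + 1) / 2) : Nat) : Int) := by push_cast; ring
  have h2 : ((k : Int) + 1) = (((k + 1 : Nat)) : Int) := by push_cast; ring
  simp only [h1, h2, PySem.Int.floordiv_natCast]
  have h3 : PySem.Int.floordiv (((k + 1 : Nat)) : Int) 2 = (((k + 1) / 2 : Nat) : Int) := by
    exact_mod_cast PySem.Int.floordiv_natCast (k + 1) 2
  rw [h3, Nat.mul_div_cancel _ hm]
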